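-- pv_equiv track=rewrite | github.com/vicious987/old_uni_assignments | python_basic/l13/wpr.py | f
-- ===== SOURCE A (Python) =====
-- def visited_dict(Tree):
--     visited = {}
--     for x in range(len(Tree)):
--         visited[x] = False
--     return visited
--
-- def travel(v, Tree, visited):
--     visited[v] = True
--     for x in Tree[v]:
--         if not visited[x]:
--             travel(x, Tree, visited)
--     return visited
--
-- def count_visited(vt):
--     counter = 0
--     for x in vt:
--         if vt[x] == True:
--             counter += 1
--     return counter
--
-- def f(Tree):
--     r = []
--     visited_tree_list = []
--     for x in Tree:
--         visited_tree_list.append(visited_dict(Tree))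
--     for i,x in enumerate(Tree):
--         travel(i, Tree, visited_tree_list[i])
--     for x in visited_tree_list:
--         r.append(count_visited(x))
--     return r
-- ===== SOURCE B (Python) =====
-- def f(Tree):
--     n = len(Tree)
--     r = []
--     for i in range(n):
--         reach = {i}
--         for _ in range(n):
--             reach = reach | {w for v in reach for w in Tree[v]}
--         r.append(len(reach))
--     return r
-- ===== Notes on version B (the rewrite author's own statement) =====
-- stated objective: alternative
-- what changed: Replaces the recursive dict-marking DFS (three helpers, a list of visited dicts) with a round-based reachability saturation: per source, a set is unioned with its neighbour image n times until it is the closed reachable set.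
import Mathlib
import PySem

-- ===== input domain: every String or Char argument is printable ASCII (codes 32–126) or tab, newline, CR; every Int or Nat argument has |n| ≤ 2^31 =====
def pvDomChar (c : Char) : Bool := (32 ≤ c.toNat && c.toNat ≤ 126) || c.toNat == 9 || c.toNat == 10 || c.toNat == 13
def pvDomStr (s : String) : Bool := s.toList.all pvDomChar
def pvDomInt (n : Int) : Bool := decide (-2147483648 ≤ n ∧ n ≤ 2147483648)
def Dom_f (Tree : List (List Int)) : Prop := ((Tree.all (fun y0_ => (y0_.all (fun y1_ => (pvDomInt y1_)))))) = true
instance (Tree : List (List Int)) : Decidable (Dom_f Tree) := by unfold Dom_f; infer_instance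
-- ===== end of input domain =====

-- B replaces A's recursive dict-marking DFS by a per-source round-based reachability
-- saturation over sets (no speed claim; neither version observably mutates its argument).

-- ===== PORT A =====
def visitedDict (Tree : List (List Int)) : PySem.Dict Int Bool :=
  (PySem.List.pyRange 0 (Tree.length : Int) 1).foldl (fun d x => d.insert x false) PySem.Dict.empty

-- fuel = Tree.length + 1 never runs out under Pre_f (each nested call turns a fresh
-- key true, and there are only Tree.length keys; proved in travel_main below);
-- `get? x = some false` is Python's `not visited[x]` (none = KeyError, excluded by
-- Pre_f); `(pyGet? Tree v).getD []` is Tree[v] (none = IndexError, excluded by Pre_f).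
def pyTravel (Tree : List (List Int)) : Nat → Int → PySem.Dict Int Bool → PySem.Dict Int Bool
  | 0, _, visited => visited
  | fuel+1, v, visited =>
      ((PySem.List.pyGet? Tree v).getD []).foldl
        (fun vis x => if vis.get? x = some false then pyTravel Tree fuel x vis else vis)
        (visited.insert v true)

def countVisited (vt : PySem.Dict Int Bool) : Int :=
  vt.keys.foldl (fun counter x => if vt.getD x false = true then counter + 1 else counter) 0

def f (Tree : List (List Int)) : List Int :=
  let vtl := Tree.foldl (fun acc _ => acc ++ [visitedDict Tree]) []
  let vtl2 := (PySem.List.enumerate vtl).map (fun p => pyTravel Tree (Tree.length + 1) p.1 p.2)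
  vtl2.foldl (fun r d => r ++ [countVisited d]) []

-- ===== PORT B =====
def reachStep (Tree : List (List Int)) (reach : PySem.Set Int) : PySem.Set Int :=
  PySem.Set.union reach
    (PySem.Set.ofList (reach.flatMap (fun v => (PySem.List.pyGet? Tree v).getD [])))

def f_alt (Tree : List (List Int)) : List Int :=
  (PySem.List.pyRange 0 (Tree.length : Int) 1).foldl (fun r i =>
    let reach := (PySem.List.pyRange 0 (Tree.length : Int) 1).foldl
      (fun reach _ => reachStep Tree reach) (PySem.Set.ofList [i])
    r ++ [PySem.Set.len reach]) []

-- ===== PRECONDITION & SPEC =====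
-- Pre_f excludes exactly the inputs where A raises KeyError: an adjacency-list entry
-- that is not an index in range(len(Tree)).
def Pre_f (Tree : List (List Int)) : Prop :=
  ∀ row ∈ Tree, ∀ x ∈ row, 0 ≤ x ∧ x < (Tree.length : Int)
instance (Tree : List (List Int)) : Decidable (Pre_f Tree) := by unfold Pre_f; infer_instance

def pvWitness_f : List (List Int) := [[1], [0], []]

def Spec_f (Tree : List (List Int)) (out : List Int) : Prop := out = f_alt Tree
instance (Tree : List (List Int)) (out : List Int) : Decidable (Spec_f Tree out) := by unfold Spec_f; infer_instance

-- ===== CLAIM (what is proved, stated in full; the proofs are below) =====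
def Claim_equal_f : Prop := ∀ (Tree : List (List Int)), Dom_f Tree → Pre_f Tree → Spec_f Tree (f Tree)

-- ===== LEMMAS AND PROOFS =====

-- the key list [0, …, n-1] of every visited dict
def kr (T : List (List Int)) : List Int := PySem.List.pyRange 0 (T.length : Int) 1

-- the adjacency list of v (Tree[v]), empty outside the index range
def nbrs (T : List (List Int)) (v : Int) : List Int := (PySem.List.pyGet? T v).getD []

-- reachability along adjacency edges
inductive Reach (T : List (List Int)) : Int → Int → Prop
  | refl (v : Int) : Reach T v v
  | step {a b c : Int} : Reach T a b → c ∈ nbrs T b → Reach T a c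

lemma Reach.trans' {T : List (List Int)} {a b c : Int}
    (h1 : Reach T a b) (h2 : Reach T b c) : Reach T a c := by
  induction h2 with
  | refl => exact h1
  | step _ hm ih => exact Reach.step ih hm

lemma mem_kr {T : List (List Int)} {x : Int} :
    x ∈ kr T ↔ 0 ≤ x ∧ x < (T.length : Int) := PySem.List.mem_pyRange_one

lemma nodup_kr (T : List (List Int)) : (kr T).Nodup := PySem.List.nodup_pyRange_one _ _

lemma length_kr (T : List (List Int)) : (kr T).length = T.length := by
  simp [kr, PySem.List.pyRange_zero_natCast]

lemma pyGet?_mem {T : List (List Int)} {v : Int} {row : List Int}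
    (h : PySem.List.pyGet? T v = some row) : row ∈ T := by
  simp only [PySem.List.pyGet?] at h
  cases hk : PySem.List.pyIdx? T.length v with
  | none => rw [hk] at h; simp at h
  | some k => rw [hk] at h; simp at h; exact List.mem_of_getElem? h

lemma nbrs_inr {T : List (List Int)} (hP : Pre_f T) {v w : Int}
    (h : w ∈ nbrs T v) : 0 ≤ w ∧ w < (T.length : Int) := by
  unfold nbrs at h
  cases hg : PySem.List.pyGet? T v with
  | none => rw [hg] at h; simp at h
  | some row => rw [hg] at h; exact hP row (pyGet?_mem hg) w h

lemma reach_inr {T : List (List Int)} (hP : Pre_f T) {i x : Int}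
    (hi : 0 ≤ i ∧ i < (T.length : Int)) (h : Reach T i x) :
    0 ≤ x ∧ x < (T.length : Int) := by
  induction h with
  | refl => exact hi
  | step _ hm _ => exact nbrs_inr hP hm

-- ---------- A side ----------

def WFd (T : List (List Int)) (d : PySem.Dict Int Bool) : Prop := d.keys = kr T

def unm (T : List (List Int)) (d : PySem.Dict Int Bool) : Nat :=
  (kr T).countP (fun k => d.get? k == some false)

lemma get?_total {T : List (List Int)} {d : PySem.Dict Int Bool} (hWF : WFd T d)
    {x : Int} (h0 : 0 ≤ x) (h1 : x < (T.length : Int)) : ∃ b, d.get? x = some b := by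
  cases h : d.get? x with
  | some b => exact ⟨b, rfl⟩
  | none =>
      rw [PySem.Dict.get?_eq_none_iff_not_mem_keys] at h
      rw [hWF] at h
      exact absurd (mem_kr.mpr ⟨h0, h1⟩) h

lemma WFd_insert {T : List (List Int)} {d : PySem.Dict Int Bool} (hWF : WFd T d)
    {v : Int} (h0 : 0 ≤ v) (h1 : v < (T.length : Int)) (b : Bool) :
    WFd T (d.insert v b) := by
  unfold WFd
  rw [PySem.Dict.keys_insert_of_contains d b
    ((PySem.Dict.contains_iff_mem_keys d v).mpr (hWF ▸ mem_kr.mpr ⟨h0, h1⟩))]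
  exact hWF

lemma unm_insert_true_le (T : List (List Int)) (d : PySem.Dict Int Bool) (x : Int) :
    unm T (d.insert x true) ≤ unm T d := by
  apply List.countP_mono_left
  intro k _ hk
  simp only [beq_iff_eq] at *
  rw [PySem.Dict.get?_insert] at hk
  split_ifs at hk with h
  · simp at hk
  · exact hk

lemma unm_mono {T : List (List Int)} {d d' : PySem.Dict Int Bool}
    (h : ∀ y, d'.get? y = d.get? y ∨ d'.get? y = some true) : unm T d' ≤ unm T d := by
  apply List.countP_mono_left
  intro k _ hk
  simp only [beq_iff_eq] at *
  rcases h k with h' | h'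
  · rw [← h']; exact hk
  · rw [h'] at hk; simp at hk

lemma unm_lt {T : List (List Int)} {d : PySem.Dict Int Bool} {x : Int}
    (hx : x ∈ kr T) (hfalse : d.get? x = some false) :
    unm T (d.insert x true) < unm T d := by
  obtain ⟨l1, l2, hsplit⟩ := List.append_of_mem hx
  have hnd : (l1 ++ x :: l2).Nodup := hsplit ▸ nodup_kr T
  have hx1 : x ∉ l1 := fun h => (List.disjoint_of_nodup_append hnd) h (by simp)
  have hx2 : x ∉ l2 := (List.nodup_cons.mp hnd.of_append_right).1
  unfold unm
  rw [hsplit, List.countP_append, List.countP_append, List.countP_cons, List.countP_cons]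
  have key : ∀ (l : List Int),
      List.countP (fun k => (d.insert x true).get? k == some false) l ≤
        List.countP (fun k => d.get? k == some false) l := by
    intro l
    apply List.countP_mono_left
    intro k _ h
    simp only [beq_iff_eq] at *
    rw [PySem.Dict.get?_insert] at h
    split_ifs at h with he
    · simp at h
    · exact h
  have h1 := key l1
  have h2 := key l2
  have e1 : (if (fun k => (d.insert x true).get? k == some false) x = true then 1 else 0) = 0 := by
    simp [PySem.Dict.get?_insert_self]
  have e2 : (if (fun k => d.get? k == some false) x = true then 1 else 0) = 1 := by
    simp [hfalse]
  rw [e1, e2]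
  omega

lemma unm_le_n (T : List (List Int)) (d : PySem.Dict Int Bool) : unm T d ≤ T.length := by
  calc unm T d ≤ (kr T).length := List.countP_le_length
  _ = T.length := length_kr T

-- visitedDict facts
lemma items_vd (T : List (List Int)) :
    (visitedDict T).items = (kr T).map (fun x => (x, false)) := by
  have h := PySem.Dict.items_foldl_insert_fresh (kr T) (fun x => x) (fun _ => false)
    PySem.Dict.empty (fun a _ => PySem.Dict.contains_empty a) (by simpa using nodup_kr T)
  simpa [visitedDict, kr] using h

lemma keys_vd (T : List (List Int)) : (visitedDict T).keys = kr T := by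
  simp [PySem.Dict.keys, items_vd, Function.comp_def]

lemma WFd_vd (T : List (List Int)) : WFd T (visitedDict T) := keys_vd T

lemma get?_vd {T : List (List Int)} {x : Int} (hx : x ∈ kr T) :
    (visitedDict T).get? x = some false := by
  apply PySem.Dict.get?_of_mem_items
  · rw [items_vd]; exact List.mem_map_of_mem hx
  · rw [keys_vd]; exact nodup_kr T

lemma not_marked_vd {T : List (List Int)} (y : Int) :
    ¬ ((visitedDict T).get? y = some true) := by
  by_cases hy : y ∈ kr T
  · rw [get?_vd hy]; simp
  · rw [(PySem.Dict.get?_eq_none_iff_not_mem_keys _ _).mpr (by rw [keys_vd]; exact hy)]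
    simp

-- the main invariant of A's recursive travel
theorem travel_main (T : List (List Int)) (hP : Pre_f T) :
    ∀ (fuel : Nat) (v : Int) (d : PySem.Dict Int Bool),
      WFd T d → 0 ≤ v → v < (T.length : Int) → unm T (d.insert v true) < fuel →
      WFd T (pyTravel T fuel v d)
      ∧ (∀ y, (pyTravel T fuel v d).get? y = d.get? y ∨ (pyTravel T fuel v d).get? y = some true)
      ∧ (pyTravel T fuel v d).get? v = some true
      ∧ (∀ y, (pyTravel T fuel v d).get? y = some true → d.get? y = some true ∨ Reach T v y)
      ∧ (∀ y, (pyTravel T fuel v d).get? y = some true → d.get? y = some true ∨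
          ∀ w ∈ nbrs T y, (pyTravel T fuel v d).get? w = some true) := by
  intro fuel
  induction fuel with
  | zero => intro v d _ _ _ h; omega
  | succ fl ihf =>
    intro v d hWF hv0 hv1 hfuel
    have hd1WF : WFd T (d.insert v true) := WFd_insert hWF hv0 hv1 true
    have hd1u : unm T (d.insert v true) ≤ fl := by omega
    have aux : ∀ (l : List Int), (∀ x ∈ l, 0 ≤ x ∧ x < (T.length : Int)) →
        ∀ vis : PySem.Dict Int Bool, WFd T vis → unm T vis ≤ fl →
        (WFd T (l.foldl (fun vis x => if vis.get? x = some false then pyTravel T fl x vis else vis) vis)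
        ∧ (∀ y, (l.foldl (fun vis x => if vis.get? x = some false then pyTravel T fl x vis else vis) vis).get? y = vis.get? y
              ∨ (l.foldl (fun vis x => if vis.get? x = some false then pyTravel T fl x vis else vis) vis).get? y = some true)
        ∧ (∀ x ∈ l, (l.foldl (fun vis x => if vis.get? x = some false then pyTravel T fl x vis else vis) vis).get? x = some true)
        ∧ (∀ y, (l.foldl (fun vis x => if vis.get? x = some false then pyTravel T fl x vis else vis) vis).get? y = some true →
              vis.get? y = some true ∨ ∃ x ∈ l, Reach T x y)
        ∧ (∀ y, (l.foldl (fun vis x => if vis.get? x = some false then pyTravel T fl x vis else vis) vis).get? y = some true →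
              vis.get? y = some true ∨
              ∀ w ∈ nbrs T y, (l.foldl (fun vis x => if vis.get? x = some false then pyTravel T fl x vis else vis) vis).get? w = some true)) := by
      intro l
      induction l with
      | nil =>
        intro _ vis hWFv _
        refine ⟨hWFv, fun y => Or.inl rfl, by simp, fun y hy => Or.inl hy, fun y hy => Or.inl hy⟩
      | cons x l ihl =>
        intro hxl vis hWFv hu
        obtain ⟨hx0, hx1⟩ := hxl x (by simp)
        by_cases hx : vis.get? x = some false
        · -- recurse
          have hrec := ihf x vis hWFv hx0 hx1
            (lt_of_lt_of_le (lt_of_lt_of_le (unm_lt (mem_kr.mpr ⟨hx0, hx1⟩) hx) hu) (le_refl _))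
          obtain ⟨W1, M1, C31, C41, C51⟩ := hrec
          have hu1 : unm T (pyTravel T fl x vis) ≤ fl := le_trans (unm_mono M1) hu
          have hrest := ihl (fun a ha => hxl a (by simp [ha])) (pyTravel T fl x vis) W1 hu1
          obtain ⟨W2, M2, C32, C42, C52⟩ := hrest
          simp only [List.foldl_cons, if_pos hx]
          refine ⟨W2, ?_, ?_, ?_, ?_⟩
          · intro y
            rcases M2 y with h | h
            · rcases M1 y with h' | h'
              · exact Or.inl (h.trans h')
              · exact Or.inr (h.trans h')
            · exact Or.inr h
          · intro a ha
            rcases List.mem_cons.mp ha with rfl | ha'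
            · rcases M2 a with h | h
              · rw [h]; exact C31
              · exact h
            · exact C32 a ha'
          · intro y hy
            rcases C42 y hy with h | ⟨x', hx', hr⟩
            · rcases C41 y h with h' | h'
              · exact Or.inl h'
              · exact Or.inr ⟨x, by simp, h'⟩
            · exact Or.inr ⟨x', by simp [hx'], hr⟩
          · intro y hy
            rcases C52 y hy with h | h
            · rcases C51 y h with h' | h'
              · exact Or.inl h'
              · refine Or.inr fun w hw => ?_
                rcases M2 w with h'' | h''
                · rw [h'']; exact h' w hw
                · exact h''
            · exact Or.inr h
        · -- x already marked (cannot be absent: WFd and x in range)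
          obtain ⟨b, hb⟩ := get?_total hWFv hx0 hx1
          have hbt : vis.get? x = some true := by
            cases b
            · exact absurd hb hx
            · exact hb
          have hrest := ihl (fun a ha => hxl a (by simp [ha])) vis hWFv hu
          obtain ⟨W2, M2, C32, C42, C52⟩ := hrest
          simp only [List.foldl_cons, if_neg hx]
          refine ⟨W2, M2, ?_, ?_, ?_⟩
          · intro a ha
            rcases List.mem_cons.mp ha with rfl | ha'
            · rcases M2 a with h | h
              · rw [h]; exact hbt
              · exact h
            · exact C32 a ha'
          · intro y hy
            rcases C42 y hy with h | ⟨x', hx', hr⟩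
            · exact Or.inl h
            · exact Or.inr ⟨x', by simp [hx'], hr⟩
          · exact C52
    have hmain := aux (nbrs T v) (fun x hx => nbrs_inr hP hx) (d.insert v true) hd1WF hd1u
    obtain ⟨W, M, CM, C4, C5⟩ := hmain
    have hunfold : pyTravel T (fl+1) v d =
        (nbrs T v).foldl (fun vis x => if vis.get? x = some false then pyTravel T fl x vis else vis) (d.insert v true) := rfl
    rw [hunfold]
    have hd1get : ∀ y, (d.insert v true).get? y = if y = v then some true else d.get? y :=
      fun y => PySem.Dict.get?_insert d v y true
    refine ⟨W, ?_, ?_, ?_, ?_⟩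
    · intro y
      rcases M y with h | h
      · rw [h, hd1get y]
        split_ifs with hyv
        · exact Or.inr rfl
        · exact Or.inl rfl
      · exact Or.inr h
    · rcases M v with h | h
      · rw [h, hd1get v, if_pos rfl]
      · exact h
    · intro y hy
      rcases C4 y hy with h | ⟨x', hx', hr⟩
      · rw [hd1get y] at h
        split_ifs at h with hyv
        · exact Or.inr (by rw [hyv]; exact Reach.refl v)
        · exact Or.inl h
      · exact Or.inr (Reach.trans' (Reach.step (Reach.refl v) hx') hr)
    · intro y hy
      rcases C5 y hy with h | h
      · rw [hd1get y] at h
        split_ifs at h with hyv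
        · subst hyv
          exact Or.inr fun w hw => CM w hw
        · exact Or.inl h
      · exact Or.inr h

-- characterisation of the marks after A's travel from i on the all-false dict
theorem travel_char (T : List (List Int)) (hP : Pre_f T) (i : Int)
    (hi0 : 0 ≤ i) (hi1 : i < (T.length : Int)) :
    WFd T (pyTravel T (T.length + 1) i (visitedDict T))
    ∧ ∀ y, ((pyTravel T (T.length + 1) i (visitedDict T)).get? y = some true ↔ Reach T i y) := by
  have hfuel : unm T ((visitedDict T).insert i true) < T.length + 1 :=
    lt_of_le_of_lt (le_trans (unm_insert_true_le T _ i) (unm_le_n T _)) (by omega)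
  obtain ⟨W, M, C3, C4, C5⟩ := travel_main T hP (T.length + 1) i (visitedDict T) (WFd_vd T) hi0 hi1 hfuel
  refine ⟨W, fun y => ⟨fun hy => ?_, fun hy => ?_⟩⟩
  · rcases C4 y hy with h | h
    · exact absurd h (not_marked_vd y)
    · exact h
  · induction hy with
    | refl => exact C3
    | step _ hm ih =>
      rcases C5 _ ih with h | h
      · exact absurd h (not_marked_vd _)
      · exact h _ hm

-- ---------- B side ----------

def itern (T : List (List Int)) : Nat → PySem.Set Int → PySem.Set Int
  | 0, s => s
  | j+1, s => itern T j (reachStep T s)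

lemma foldl_reachStep (T : List (List Int)) :
    ∀ (l : List Int) (s : PySem.Set Int),
      l.foldl (fun s _ => reachStep T s) s = itern T l.length s := by
  intro l
  induction l with
  | nil => intro s; rfl
  | cons x l ih => intro s; simp only [List.foldl_cons, List.length_cons]; exact ih (reachStep T s)

lemma mem_reachStep {T : List (List Int)} {s : PySem.Set Int} {x : Int} :
    x ∈ reachStep T s ↔ x ∈ s ∨ ∃ v ∈ s, x ∈ nbrs T v := by
  simp [reachStep, PySem.Set.mem_union, PySem.Set.mem_ofList, List.mem_flatMap, nbrs]

lemma nodup_itern (T : List (List Int)) :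
    ∀ (j : Nat) (s : PySem.Set Int), s.Nodup → (itern T j s).Nodup := by
  intro j
  induction j with
  | zero => intro s h; exact h
  | succ j ih => intro s h; exact ih _ (PySem.Set.nodup_union _ _ h)

lemma subset_itern (T : List (List Int)) :
    ∀ (j : Nat) (s : PySem.Set Int) (x : Int), x ∈ s → x ∈ itern T j s := by
  intro j
  induction j with
  | zero => intro s x h; exact h
  | succ j ih => intro s x h; exact ih _ _ (mem_reachStep.mpr (Or.inl h))

lemma sound_itern (T : List (List Int)) (i : Int) :
    ∀ (j : Nat) (s : PySem.Set Int), (∀ x ∈ s, Reach T i x) →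
      ∀ x ∈ itern T j s, Reach T i x := by
  intro j
  induction j with
  | zero => intro s h; exact h
  | succ j ih =>
    intro s h
    apply ih
    intro x hx
    rcases mem_reachStep.mp hx with h' | ⟨v, hv, hw⟩
    · exact h x h'
    · exact Reach.step (h v hv) hw

lemma itern_stab {T : List (List Int)} {s : PySem.Set Int}
    (hs : reachStep T s = s) : ∀ j, itern T j s = s := by
  intro j
  induction j with
  | zero => rfl
  | succ j ih => show itern T j (reachStep T s) = s; rw [hs]; exact ih

lemma union_prefix {α : Type} [BEq α] :
    ∀ (t : List α) (s : PySem.Set α), ∃ e, PySem.Set.union s t = s ++ e := by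
  intro t
  induction t with
  | nil => intro s; exact ⟨[], by simp [PySem.Set.union, PySem.Set.update]⟩
  | cons x t ih =>
    intro s
    have hstep : PySem.Set.union s (x :: t) = PySem.Set.union (PySem.Set.add s x) t := by
      simp [PySem.Set.union, PySem.Set.update]
    obtain ⟨e, he⟩ := ih (PySem.Set.add s x)
    by_cases hc : List.contains s x = true
    · exact ⟨e, by rw [hstep, he]; simp [PySem.Set.add, PySem.Set.contains, hc]⟩
    · refine ⟨x :: e, ?_⟩
      rw [hstep, he]
      simp [PySem.Set.add, PySem.Set.contains, hc]

lemma reachStep_prefix (T : List (List Int)) (s : PySem.Set Int) :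
    ∃ e, reachStep T s = s ++ e := union_prefix _ _

lemma grow (T : List (List Int)) :
    ∀ (j : Nat) (s : PySem.Set Int), s.Nodup →
      reachStep T (itern T j s) = itern T j s ∨ s.length + j ≤ (itern T j s).length := by
  intro j
  induction j with
  | zero => intro s _; right; simp [itern]
  | succ j ih =>
    intro s hnd
    by_cases hs : reachStep T s = s
    · left
      have h1 : itern T (j+1) s = s := itern_stab hs (j+1)
      rw [h1]; exact hs
    · obtain ⟨e, he⟩ := reachStep_prefix T s
      have hlen : s.length + 1 ≤ (reachStep T s).length := by
        cases e with
        | nil => exact absurd (by simpa using he) hs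
        | cons a e' => rw [he]; simp
      have hnd' : (reachStep T s).Nodup := PySem.Set.nodup_union _ _ hnd
      rcases ih (reachStep T s) hnd' with h | h
      · left; exact h
      · right
        show s.length + (j + 1) ≤ (itern T j (reachStep T s)).length
        omega

lemma nodup_len_le_of_subset (l1 l2 : List Int) (h1 : l1.Nodup)
    (hsub : ∀ x ∈ l1, x ∈ l2) : l1.length ≤ l2.length := by
  calc l1.length = l1.toFinset.card := (List.toFinset_card_of_nodup h1).symm
  _ ≤ l2.toFinset.card := Finset.card_le_card (by
      intro a ha
      rw [List.mem_toFinset] at *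
      exact hsub a ha)
  _ ≤ l2.length := List.toFinset_card_le l2

lemma ofList_single (i : Int) : PySem.Set.ofList [i] = [i] :=
  PySem.Set.ofList_eq_self_of_nodup _ (by simp)

lemma mem_S_iff (T : List (List Int)) (hP : Pre_f T) (i : Int)
    (hi0 : 0 ≤ i) (hi1 : i < (T.length : Int)) :
    ∀ x, (x ∈ itern T T.length (PySem.Set.ofList [i]) ↔ Reach T i x) := by
  have hbase : ∀ x ∈ PySem.Set.ofList [i], Reach T i x := by
    intro x hx
    rw [ofList_single] at hx
    have hxi : x = i := by simpa using hx
    rw [hxi]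
    exact Reach.refl i
  have hsound : ∀ x ∈ itern T T.length (PySem.Set.ofList [i]), Reach T i x :=
    sound_itern T i T.length _ hbase
  have hnd : (itern T T.length (PySem.Set.ofList [i])).Nodup :=
    nodup_itern T _ _ (PySem.Set.nodup_ofList _)
  have hclosed : reachStep T (itern T T.length (PySem.Set.ofList [i]))
      = itern T T.length (PySem.Set.ofList [i]) := by
    rcases grow T T.length (PySem.Set.ofList [i]) (PySem.Set.nodup_ofList _) with h | h
    · exact h
    · exfalso
      have hsub : ∀ x ∈ itern T T.length (PySem.Set.ofList [i]), x ∈ kr T := by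
        intro x hx
        exact mem_kr.mpr (reach_inr hP ⟨hi0, hi1⟩ (hsound x hx))
      have hle := nodup_len_le_of_subset _ (kr T) hnd hsub
      rw [length_kr] at hle
      have hlen1 : (PySem.Set.ofList [i] : List Int).length = 1 := by rw [ofList_single]; rfl
      rw [hlen1] at h
      omega
  intro x
  refine ⟨hsound x, fun hx => ?_⟩
  induction hx with
  | refl => exact subset_itern T _ _ i (by rw [ofList_single]; simp)
  | step _ hm ih =>
    rw [← hclosed]
    exact mem_reachStep.mpr (Or.inr ⟨_, ih, hm⟩)

-- ---------- per-source equality and assembly ----------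

lemma point_eq (T : List (List Int)) (hP : Pre_f T) (i : Int)
    (hi0 : 0 ≤ i) (hi1 : i < (T.length : Int)) :
    countVisited (pyTravel T (T.length + 1) i (visitedDict T)) =
      PySem.Set.len (itern T T.length (PySem.Set.ofList [i])) := by
  obtain ⟨hWF, hchar⟩ := travel_char T hP i hi0 hi1
  have hS := mem_S_iff T hP i hi0 hi1
  set d := pyTravel T (T.length + 1) i (visitedDict T) with hd
  set S := itern T T.length (PySem.Set.ofList [i]) with hSdef
  have hcount : countVisited d = ((kr T).countP (fun k => d.getD k false) : Int) := by
    unfold countVisited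
    rw [PySem.List.foldl_count_if (fun x => d.getD x false) d.keys 0, hWF]
    simp
  have hfilter : ((kr T).filter (fun k => d.getD k false)).length = S.length := by
    have hmem : ∀ x, (x ∈ (kr T).filter (fun k => d.getD k false) ↔ x ∈ S) := by
      intro x
      rw [List.mem_filter, hS x, ← hchar x]
      constructor
      · rintro ⟨hxk, hxv⟩
        rw [PySem.Dict.getD_eq_get?_getD] at hxv
        cases hg : d.get? x with
        | none => rw [hg] at hxv; simp at hxv
        | some b => rw [hg] at hxv; simp at hxv; rw [hxv]
      · intro hg
        have hxr : x ∈ kr T := by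
          rw [hchar x] at hg
          exact mem_kr.mpr (reach_inr hP ⟨hi0, hi1⟩ hg)
        refine ⟨hxr, ?_⟩
        rw [PySem.Dict.getD_eq_get?_getD, hg]
        rfl
    have hnd1 : ((kr T).filter (fun k => d.getD k false)).Nodup :=
      List.Nodup.filter _ (nodup_kr T)
    have hnd2 : S.Nodup := nodup_itern T _ _ (PySem.Set.nodup_ofList _)
    have h1 := nodup_len_le_of_subset _ S hnd1 (fun x hx => (hmem x).mp hx)
    have h2 := nodup_len_le_of_subset S _ hnd2 (fun x hx => (hmem x).mpr hx)
    omega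
  rw [hcount, PySem.Set.len, ← hfilter, List.countP_eq_length_filter]

theorem f_spec : Claim_equal_f := by
  intro T _ hP
  unfold Spec_f
  simp only [f, f_alt]
  have h1 : T.foldl (fun acc (_ : List Int) => acc ++ [visitedDict T]) [] =
      [] ++ T.map (fun _ => visitedDict T) :=
    PySem.List.foldl_append_singleton_eq_map (fun _ => visitedDict T) T []
  rw [h1]
  simp only [List.nil_append]
  rw [PySem.List.enumerate_eq_map_pyRange (T.map fun _ => visitedDict T) (visitedDict T)]
  have h2 : ∀ l : List (PySem.Dict Int Bool),
      l.foldl (fun r d => r ++ [countVisited d]) [] = [] ++ l.map countVisited :=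
    fun l => PySem.List.foldl_append_singleton_eq_map countVisited l []
  rw [h2]
  have h3 : (PySem.List.pyRange 0 (T.length : Int) 1).foldl
      (fun r i => r ++ [PySem.Set.len ((PySem.List.pyRange 0 (T.length : Int) 1).foldl
          (fun reach _ => reachStep T reach) (PySem.Set.ofList [i]))]) [] =
      [] ++ (PySem.List.pyRange 0 (T.length : Int) 1).map
        (fun i => PySem.Set.len ((PySem.List.pyRange 0 (T.length : Int) 1).foldl
          (fun reach _ => reachStep T reach) (PySem.Set.ofList [i]))) :=
    PySem.List.foldl_append_singleton_eq_map _ _ []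
  rw [h3]
  simp only [List.nil_append, List.map_map]
  have hlenv : PySem.List.len (T.map fun _ => visitedDict T) = (T.length : Int) := by
    simp [PySem.List.len]
  rw [hlenv]
  apply List.map_congr_left
  intro i hi
  obtain ⟨hi0, hi1⟩ := mem_kr.mp (show i ∈ kr T from hi)
  show countVisited (pyTravel T (T.length + 1) i
      (PySem.List.pyGetD (T.map fun _ => visitedDict T) i (visitedDict T))) =
    PySem.Set.len ((PySem.List.pyRange 0 (T.length : Int) 1).foldl
      (fun reach _ => reachStep T reach) (PySem.Set.ofList [i]))
  have hget : PySem.List.pyGetD (T.map fun _ => visitedDict T) i (visitedDict T)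
      = visitedDict T := by
    have h := PySem.List.pyGetD_map (fun _ => visitedDict T) T i []
    simpa using h
  rw [hget, foldl_reachStep T]
  have hlkr : (PySem.List.pyRange 0 (T.length : Int) 1).length = T.length := length_kr T
  rw [hlkr]
  exact point_eq T hP i hi0 hi1
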